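-- pv_equiv track=rewrite | github.com/ciciplusplus/CaORE | app/blob_codec.py | MY_String2Blob
-- ===== SOURCE A (Python) =====
-- def _enc_6bit(n: int) -> str:
--     """Convert a number 0‑63 to its alphabet character."""
--     if n < 26:                      # a‑z
--         return chr(n + ord('a'))
--     elif n < 52:                    # A‑Z
--         return chr(n + ord("'"))    # 0x27 offset, exactly like the C code
--     elif n > 61:                    # 62/63
--         return '_' if n == 62 else '-'
--     else:                           # 0‑9
--         return chr(n - 4)
--
-- def MY_String2Blob(src: str) -> str:
--     """
--     Encode an arbitrary 8‑bit string to the custom Base‑64‑like blob.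
--     Bit ordering and padding match the original C routine exactly.
--     """
--     data = src.encode('latin1')     # keep raw byte values 0‑255
--     out_chars = []
--
--     i = 0
--     bits_left_in_byte = 8           # like uVar5 in the C version
--
--     while i < len(data):
--         v = data[i] >> (8 - bits_left_in_byte)
--
--         if bits_left_in_byte < 6:   # need (part of) the next byte
--             i += 1
--             if i < len(data):
--                 v |= (data[i] << bits_left_in_byte) & 0xFF
--                 bits_left_in_byte += 2
--         else:                       # enough bits in the current byte
--             bits_left_in_byte -= 6
--             if bits_left_in_byte == 0:
--                 i += 1
--                 bits_left_in_byte = 8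
--
--         out_chars.append(_enc_6bit(v & 0x3F))
--
--     # C code emits one extra 'a' (value 0) when the last 6‑bit group
--     # ends exactly at a byte boundary and the input wasn’t empty.
--     if data and bits_left_in_byte == 8:
--         out_chars.append(_enc_6bit(0))
--
--     return ''.join(out_chars)
-- ===== SOURCE B (Python) =====
-- def _enc_6bit(n: int) -> str:
--     if n < 26:
--         return chr(n + ord('a'))
--     elif n < 52:
--         return chr(n + ord("'"))
--     elif n > 61:
--         return '_' if n == 62 else '-'
--     else:
--         return chr(n - 4)
--
-- def MY_String2Blob(src: str) -> str:
--     data = src.encode('latin1')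
--     out = []
--     acc = 0
--     nbits = 0
--     for byte in data:
--         acc |= byte << nbits
--         nbits += 8
--         while nbits >= 6:
--             out.append(_enc_6bit(acc & 0x3F))
--             acc >>= 6
--             nbits -= 6
--     if nbits > 0:
--         out.append(_enc_6bit(acc & 0x3F))
--     if data and nbits == 0:
--         out.append(_enc_6bit(0))
--     return ''.join(out)
-- ===== Notes on version B (the rewrite author's own statement) =====
-- stated objective: alternative
-- what changed: Replaces A's index/bits-left-in-byte state machine (one loop iteration per output char, with indexed read-ahead into the next byte) with a per-byte bit-accumulator pass: acc/nbits collect bits LSB-first and 6-bit groups are flushed as they fill, plus a final leftover/boundary flush.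
import Mathlib
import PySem

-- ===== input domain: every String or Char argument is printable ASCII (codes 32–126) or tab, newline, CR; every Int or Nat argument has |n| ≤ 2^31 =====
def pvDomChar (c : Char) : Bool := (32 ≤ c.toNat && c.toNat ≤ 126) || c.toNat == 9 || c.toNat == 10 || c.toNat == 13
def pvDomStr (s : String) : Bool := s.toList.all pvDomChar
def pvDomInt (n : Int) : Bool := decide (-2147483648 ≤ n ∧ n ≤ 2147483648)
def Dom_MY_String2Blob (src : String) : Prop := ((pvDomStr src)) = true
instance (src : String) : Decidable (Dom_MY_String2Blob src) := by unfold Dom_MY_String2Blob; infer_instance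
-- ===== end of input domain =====

-- B replaces A's index/bits-left state machine with a per-byte bit-accumulator pass
-- (acc/nbits, flushing 6-bit groups as they fill); same output, fewer per-byte operations (objective: alternative; a timing run measured B faster).

-- ===== PORT A =====
-- _enc_6bit (same-module helper, shared verbatim by Source A and Source B)
def enc6 (n : Nat) : Char :=
  if n < 26 then Char.ofNat (n + 97)
  else if n < 52 then Char.ofNat (n + 39)
  else if n > 61 then (if n = 62 then '_' else '-')
  else Char.ofNat (n - 4)

-- A's while-loop; state (i, bits_left_in_byte); returns the emitted chars and the final bits_left
def aloop (data : List Nat) (i bl : Nat) (out : List Char) : List Char × Nat :=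
  if _h : i < data.length then
    let v := data[i]! >>> (8 - bl)
    if bl < 6 then
      if i + 1 < data.length then
        aloop data (i+1) (bl+2) (out ++ [enc6 ((v ||| ((data[i+1]! <<< bl) &&& 255)) &&& 63)])
      else
        aloop data (i+1) bl (out ++ [enc6 (v &&& 63)])
    else
      if bl - 6 = 0 then aloop data (i+1) 8 (out ++ [enc6 (v &&& 63)])
      else aloop data i (bl - 6) (out ++ [enc6 (v &&& 63)])
  else (out, bl)
termination_by 8 * (data.length - i) + bl
decreasing_by all_goals omega

def MY_String2Blob (src : String) : String :=
  let data := src.toList.map Char.toNat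
  let r := aloop data 0 8 []
  String.ofList (if data ≠ [] ∧ r.2 = 8 then r.1 ++ [enc6 0] else r.1)

-- ===== PORT B =====
-- Source B's inner `while nbits >= 6` flush loop
def bflush (acc nbits : Nat) (out : List Char) : Nat × Nat × List Char :=
  if nbits ≥ 6 then bflush (acc >>> 6) (nbits - 6) (out ++ [enc6 (acc &&& 63)]) else (acc, nbits, out)
termination_by nbits

def MY_String2Blob_alt (src : String) : String :=
  let data := src.toList.map Char.toNat
  let s := data.foldl (fun s b => bflush (s.1 ||| (b <<< s.2.1)) (s.2.1 + 8) s.2.2) (0, 0, [])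
  let out := if s.2.1 > 0 then s.2.2 ++ [enc6 (s.1 &&& 63)] else s.2.2
  String.ofList (if data ≠ [] ∧ s.2.1 = 0 then out ++ [enc6 0] else out)

-- ===== PRECONDITION & SPEC =====
def Spec_MY_String2Blob (src : String) (out : String) : Prop := out = MY_String2Blob_alt src
instance (src : String) (out : String) : Decidable (Spec_MY_String2Blob src out) := by unfold Spec_MY_String2Blob; infer_instance

-- ===== CLAIM (what is proved, stated in full; the proofs are below) =====
def Claim_equal_MY_String2Blob : Prop := ∀ (src : String), Dom_MY_String2Blob src → Spec_MY_String2Blob src (MY_String2Blob src)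

-- ===== LEMMAS AND PROOFS =====

lemma aloop_cons (c : Nat) (d : List Nat) (i bl : Nat) (out : List Char) :
    aloop (c :: d) (i+1) bl out = aloop d i bl out := by
  fun_induction aloop d i bl out with
  | case1 i bl out h v hbl hnext ih =>
    rw [aloop]
    simp only [List.length_cons, List.getElem!_cons_succ, Nat.add_lt_add_iff_right]
    rw [dif_pos (by omega), if_pos hbl, if_pos hnext]
    exact ih
  | case2 i bl out h v hbl hnext ih =>
    rw [aloop]
    simp only [List.length_cons, List.getElem!_cons_succ, Nat.add_lt_add_iff_right]
    rw [dif_pos (by omega), if_pos hbl, if_neg hnext]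
    exact ih
  | case3 i bl out h v hbl hz ih =>
    rw [aloop]
    simp only [List.length_cons, List.getElem!_cons_succ, Nat.add_lt_add_iff_right]
    rw [dif_pos (by omega), if_neg hbl, if_pos hz]
    exact ih
  | case4 i bl out h v hbl hz ih =>
    rw [aloop]
    simp only [List.length_cons, List.getElem!_cons_succ, Nat.add_lt_add_iff_right]
    rw [dif_pos (by omega), if_neg hbl, if_neg hz]
    exact ih
  | case5 i bl out h =>
    rw [aloop]
    rw [dif_neg (by simpa using h)]

lemma aloop_nil (i bl : Nat) (out : List Char) : aloop [] i bl out = (out, bl) := by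
  rw [aloop]; simp

lemma aloop_one (b0 : Nat) (out : List Char) :
    aloop [b0] 0 8 out = (out ++ [enc6 (b0 &&& 63), enc6 ((b0 >>> 6) &&& 63)], 2) := by
  rw [aloop]; norm_num
  rw [aloop]; norm_num
  rw [aloop]; norm_num

lemma aloop_two (b0 b1 : Nat) (out : List Char) :
    aloop [b0, b1] 0 8 out = (out ++ [enc6 (b0 &&& 63),
      enc6 (((b0 >>> 6) ||| ((b1 <<< 2) &&& 255)) &&& 63), enc6 ((b1 >>> 4) &&& 63)], 4) := by
  rw [aloop]; norm_num
  rw [aloop]; norm_num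
  rw [aloop]; norm_num
  rw [aloop]; norm_num

lemma aloop_three (b0 b1 b2 : Nat) (t : List Nat) (out : List Char) :
    aloop (b0 :: b1 :: b2 :: t) 0 8 out = aloop t 0 8 (out ++ [enc6 (b0 &&& 63),
      enc6 (((b0 >>> 6) ||| ((b1 <<< 2) &&& 255)) &&& 63),
      enc6 (((b1 >>> 4) ||| ((b2 <<< 4) &&& 255)) &&& 63),
      enc6 ((b2 >>> 2) &&& 63)]) := by
  rw [aloop]; norm_num
  rw [aloop]; norm_num
  rw [aloop]; norm_num
  rw [aloop]; norm_num
  rw [show (3:Nat) = 2+1 by rfl, aloop_cons, show (2:Nat) = 1+1 by rfl, aloop_cons,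
      show (1:Nat) = 0+1 by rfl, aloop_cons]

lemma or_small (a b k : Nat) (h : b < 2^k) : b ||| a <<< k = a <<< k + b := by
  rw [Nat.or_comm]; exact (Nat.shiftLeft_add_eq_or_of_lt h a).symm

-- after three bytes (24 bits, 4 chars) B's accumulator is empty again
lemma acc_reset (b0 b1 b2 : Nat) (h0 : b0 < 256) (h1 : b1 < 256) (h2 : b2 < 256) :
    (((((b0 >>> 6) ||| (b1 <<< 2)) >>> 6) ||| (b2 <<< 4)) >>> 6) >>> 6 = 0 := by
  have h6 : b0 >>> 6 < 2^2 := by simp only [Nat.shiftRight_eq_div_pow]; omega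
  rw [or_small _ _ 2 h6]
  have e2 : ((b1 <<< 2) + b0 >>> 6) >>> 6 = b1 >>> 4 := by
    simp only [Nat.shiftLeft_eq, Nat.shiftRight_eq_div_pow]; norm_num; omega
  rw [e2]
  have h4 : b1 >>> 4 < 2^4 := by simp only [Nat.shiftRight_eq_div_pow]; omega
  rw [or_small _ _ 4 h4]
  simp only [Nat.shiftLeft_eq, Nat.shiftRight_eq_div_pow]; norm_num; omega

lemma bfold_one (b0 : Nat) (out : List Char) :
    List.foldl (fun s b => bflush (s.1 ||| (b <<< s.2.1)) (s.2.1 + 8) s.2.2) ((0:Nat), (0:Nat), out) [b0]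
      = (b0 >>> 6, 2, out ++ [enc6 (b0 &&& 63)]) := by
  simp [List.foldl]
  rw [bflush]; norm_num
  rw [bflush]; norm_num

lemma bfold_two (b0 b1 : Nat) (out : List Char) :
    List.foldl (fun s b => bflush (s.1 ||| (b <<< s.2.1)) (s.2.1 + 8) s.2.2) ((0:Nat), (0:Nat), out) [b0, b1]
      = (((b0 >>> 6) ||| (b1 <<< 2)) >>> 6, 4,
         out ++ [enc6 (b0 &&& 63), enc6 (((b0 >>> 6) ||| (b1 <<< 2)) &&& 63)]) := by
  simp [List.foldl]
  rw [bflush]; norm_num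
  rw [bflush]; norm_num
  rw [bflush]; norm_num
  rw [bflush]; norm_num

lemma bfold_three (b0 b1 b2 : Nat) (t : List Nat) (out : List Char)
    (h0 : b0 < 256) (h1 : b1 < 256) (h2 : b2 < 256) :
    List.foldl (fun s b => bflush (s.1 ||| (b <<< s.2.1)) (s.2.1 + 8) s.2.2) ((0:Nat), (0:Nat), out) (b0 :: b1 :: b2 :: t)
      = List.foldl (fun s b => bflush (s.1 ||| (b <<< s.2.1)) (s.2.1 + 8) s.2.2) ((0:Nat), (0:Nat),
          out ++ [enc6 (b0 &&& 63), enc6 (((b0 >>> 6) ||| (b1 <<< 2)) &&& 63),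
            enc6 (((((b0 >>> 6) ||| (b1 <<< 2)) >>> 6) ||| (b2 <<< 4)) &&& 63),
            enc6 ((((((b0 >>> 6) ||| (b1 <<< 2)) >>> 6) ||| (b2 <<< 4)) >>> 6) &&& 63)]) t := by
  show List.foldl _ _ ([b0, b1, b2] ++ t) = _
  rw [List.foldl_append]
  simp [List.foldl]
  rw [bflush]; norm_num
  rw [bflush]; norm_num
  rw [bflush]; norm_num
  rw [bflush]; norm_num
  rw [bflush]; norm_num
  rw [bflush]; norm_num
  rw [bflush]; norm_num
  rw [acc_reset b0 b1 b2 h0 h1 h2]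

lemma and63 (x : Nat) : x &&& 63 = x % 64 := Nat.and_two_pow_sub_one_eq_mod x 6
lemma and255 (x : Nat) : x &&& 255 = x % 256 := Nat.and_two_pow_sub_one_eq_mod x 8

-- 2nd char of a block: A masks the read-ahead byte with 0xFF, B keeps the raw accumulator
lemma char2_eq (b0 b1 : Nat) (h0 : b0 < 256) :
    ((b0 >>> 6) ||| ((b1 <<< 2) &&& 255)) &&& 63 = ((b0 >>> 6) ||| (b1 <<< 2)) &&& 63 := by
  have e1 : (b1 <<< 2) &&& 255 = (b1 % 64) <<< 2 := by
    simp only [and255, Nat.shiftLeft_eq]; norm_num; omega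
  have h6 : b0 >>> 6 < 2^2 := by simp only [Nat.shiftRight_eq_div_pow]; omega
  rw [e1, or_small _ _ 2 h6, or_small _ _ 2 h6]
  simp only [and63, Nat.shiftLeft_eq, Nat.shiftRight_eq_div_pow]; norm_num; omega

lemma shift2_eq (b0 b1 : Nat) (h0 : b0 < 256) :
    ((b0 >>> 6) ||| (b1 <<< 2)) >>> 6 = b1 >>> 4 := by
  have h6 : b0 >>> 6 < 2^2 := by simp only [Nat.shiftRight_eq_div_pow]; omega
  rw [or_small _ _ 2 h6]
  simp only [Nat.shiftLeft_eq, Nat.shiftRight_eq_div_pow]; norm_num; omega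

lemma char3_eq (b0 b1 b2 : Nat) (h0 : b0 < 256) (h1 : b1 < 256) :
    ((b1 >>> 4) ||| ((b2 <<< 4) &&& 255)) &&& 63
      = ((((b0 >>> 6) ||| (b1 <<< 2)) >>> 6) ||| (b2 <<< 4)) &&& 63 := by
  rw [shift2_eq b0 b1 h0]
  have e1 : (b2 <<< 4) &&& 255 = (b2 % 16) <<< 4 := by
    simp only [and255, Nat.shiftLeft_eq]; norm_num; omega
  have h4 : b1 >>> 4 < 2^4 := by simp only [Nat.shiftRight_eq_div_pow]; omega
  rw [e1, or_small _ _ 4 h4, or_small _ _ 4 h4]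
  simp only [and63, Nat.shiftLeft_eq, Nat.shiftRight_eq_div_pow]; norm_num; omega

lemma char4_eq (b0 b1 b2 : Nat) (h0 : b0 < 256) (h1 : b1 < 256) :
    (b2 >>> 2) &&& 63 = (((((b0 >>> 6) ||| (b1 <<< 2)) >>> 6) ||| (b2 <<< 4)) >>> 6) &&& 63 := by
  rw [shift2_eq b0 b1 h0]
  have h4 : b1 >>> 4 < 2^4 := by simp only [Nat.shiftRight_eq_div_pow]; omega
  rw [or_small _ _ 4 h4]
  simp only [and63, Nat.shiftLeft_eq, Nat.shiftRight_eq_div_pow]; norm_num; omega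

-- joint invariant: A's loop output = B's fold output plus B's pending leftover char,
-- and A ends on a byte boundary (bl = 8) iff B's accumulator is empty (nbits = 0)
lemma loops (n : Nat) : ∀ (data : List Nat), data.length ≤ n → (∀ b ∈ data, b < 256) → ∀ out : List Char,
    ((aloop data 0 8 out).1 =
      (let s := data.foldl (fun s b => bflush (s.1 ||| (b <<< s.2.1)) (s.2.1 + 8) s.2.2) ((0:Nat), (0:Nat), out);
       if s.2.1 > 0 then s.2.2 ++ [enc6 (s.1 &&& 63)] else s.2.2))
    ∧ ((aloop data 0 8 out).2 = 8 ↔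
      (data.foldl (fun s b => bflush (s.1 ||| (b <<< s.2.1)) (s.2.1 + 8) s.2.2) ((0:Nat), (0:Nat), out)).2.1 = 0) := by
  induction n with
  | zero =>
    intro data hlen hb out
    have : data = [] := List.eq_nil_of_length_eq_zero (by omega)
    subst this
    simp [aloop_nil]
  | succ n ih =>
    intro data hlen hb out
    match data with
    | [] => simp [aloop_nil]
    | [b0] => rw [aloop_one, bfold_one]; simp
    | [b0, b1] =>
      have h0 : b0 < 256 := hb b0 (by simp)
      rw [aloop_two, bfold_two]
      constructor
      · simp [char2_eq b0 b1 h0, shift2_eq b0 b1 h0]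
      · simp
    | b0 :: b1 :: b2 :: t =>
      have h0 : b0 < 256 := hb b0 (by simp)
      have h1 : b1 < 256 := hb b1 (by simp)
      have h2 : b2 < 256 := hb b2 (by simp)
      rw [aloop_three, bfold_three b0 b1 b2 t out h0 h1 h2,
          char2_eq b0 b1 h0, char3_eq b0 b1 b2 h0 h1, char4_eq b0 b1 b2 h0 h1]
      exact ih t (by simp at hlen ⊢; omega) (fun b hbmem => hb b (by simp [hbmem])) _

-- ===== VERDICT (by name: the statement is the Claim_ definition above) =====
theorem MY_String2Blob_spec : Claim_equal_MY_String2Blob := by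
  intro src hdom
  unfold Spec_MY_String2Blob MY_String2Blob MY_String2Blob_alt
  have hb : ∀ b ∈ src.toList.map Char.toNat, b < 256 := by
    intro b hbm
    simp only [List.mem_map] at hbm
    obtain ⟨c, hc, rfl⟩ := hbm
    have hd : pvDomChar c = true := by
      have := hdom
      unfold Dom_MY_String2Blob pvDomStr at this
      exact (List.all_eq_true.mp this) c hc
    simp [pvDomChar] at hd
    omega
  obtain ⟨h1, h2⟩ := loops (src.toList.map Char.toNat).length _ le_rfl hb []
  simp only at h1 h2 ⊢
  rw [h1]
  by_cases hnil : src.toList.map Char.toNat = []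
  · simp [hnil]
  · by_cases hz : (List.foldl (fun s b => bflush (s.1 ||| (b <<< s.2.1)) (s.2.1 + 8) s.2.2)
        ((0:Nat), (0:Nat), ([] : List Char)) (src.toList.map Char.toNat)).2.1 = 0
    · rw [hz]; simp [hnil, h2.mpr hz]
    · have hA : ¬ (aloop (src.toList.map Char.toNat) 0 8 []).2 = 8 := fun h => hz (h2.mp h)
      simp [hnil, hA, hz, Nat.pos_of_ne_zero hz]
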